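-- pv_equiv track=rewrite | github.com/Johnxjp/aoc | 2024/d8.py | get_all_antinode_locs
-- ===== SOURCE A (Python) =====
-- from typing import Tuple, Set
--
-- def get_all_antinode_locs(
--     frequency_pair: Tuple[Tuple[int, int], Tuple[int, int]], nrows: int, ncols: int
-- ) -> list[Tuple[Tuple[int, int], Tuple[int, int]]]:
--     p1, p2 = frequency_pair
--     dx = p1[0] - p2[0]
--     dy = p1[1] - p2[1]
--
--     antinode_locs = set()
--     a = (p1[0], p1[1])
--     while is_valid_loc(a, nrows, ncols):
--         antinode_locs.add(a)
--         a = (a[0] + dx, a[1] + dy)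
--
--     a = (p2[0], p2[1])
--     while is_valid_loc(a, nrows, ncols):
--         antinode_locs.add(a)
--         a = (a[0] - dx, a[1] - dy)
--
--     return antinode_locs
--
-- def is_valid_loc(antinode_loc: Tuple[int, int], nrows: int, ncols: int) -> bool:
--     x, y = antinode_loc
--     if x < 0 or x >= nrows or y < 0 or y >= ncols:
--         return False
--     return True
-- ===== SOURCE B (Python) =====
-- def get_all_antinode_locs(frequency_pair, nrows, ncols):
--     p1, p2 = frequency_pair
--     dx = p1[0] - p2[0]
--     dy = p1[1] - p2[1]
--     return set(_ray(p1, dx, dy, nrows, ncols) + _ray(p2, -dx, -dy, nrows, ncols))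
--
-- def _ray(p, sx, sy, nrows, ncols):
--     # all in-bounds points p, p+s, p+2s, ... computed with closed-form step counts
--     x, y = p
--     if x < 0 or x >= nrows or y < 0 or y >= ncols:
--         return []
--     bounds = []
--     if sx > 0:
--         bounds.append((nrows - 1 - x) // sx)
--     elif sx < 0:
--         bounds.append(x // (-sx))
--     if sy > 0:
--         bounds.append((ncols - 1 - y) // sy)
--     elif sy < 0:
--         bounds.append(y // (-sy))
--     if not bounds:
--         return [(x, y)]
--     f = min(bounds)
--     return [(x + k * sx, y + k * sy) for k in range(f + 1)]
-- ===== Notes on version B (the rewrite author's own statement) =====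
-- stated objective: alternative
-- what changed: B replaces A's two step-and-test while-loops with a set accumulator by closed-form floor-division step counts along each direction, building the two in-bounds rays directly as list comprehensions and deduplicating once with set().
-- outside the precondition, e.g. on get_all_antinode_locs(((1, 1), (1, 1)), 3, 3): A does not finish within the time limit, B returns {(1, 1)}
import Mathlib
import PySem

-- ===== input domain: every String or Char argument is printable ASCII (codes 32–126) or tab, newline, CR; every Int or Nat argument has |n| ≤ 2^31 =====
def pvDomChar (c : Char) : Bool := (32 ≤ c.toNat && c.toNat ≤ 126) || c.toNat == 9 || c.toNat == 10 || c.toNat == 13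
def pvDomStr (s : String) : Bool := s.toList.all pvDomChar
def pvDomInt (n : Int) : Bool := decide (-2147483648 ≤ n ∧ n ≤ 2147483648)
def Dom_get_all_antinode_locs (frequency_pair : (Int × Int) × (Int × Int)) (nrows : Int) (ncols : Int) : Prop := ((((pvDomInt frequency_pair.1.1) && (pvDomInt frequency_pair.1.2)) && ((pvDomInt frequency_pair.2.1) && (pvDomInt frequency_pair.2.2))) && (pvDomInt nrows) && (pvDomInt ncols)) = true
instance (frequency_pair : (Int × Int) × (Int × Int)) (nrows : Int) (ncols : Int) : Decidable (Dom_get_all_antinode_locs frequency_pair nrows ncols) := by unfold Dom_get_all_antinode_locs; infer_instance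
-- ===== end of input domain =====

-- B replaces A's two step-and-test while-loops over a set by closed-form floor-division
-- step counts that build the two in-bounds rays directly; the equivalence is about the
-- returned set's element list (Python's hash iteration order is not modelled).

-- ===== PORT A =====
def pvIsValidLoc (antinode_loc : Int × Int) (nrows ncols : Int) : Bool :=
  if antinode_loc.1 < 0 || nrows ≤ antinode_loc.1 || antinode_loc.2 < 0 || ncols ≤ antinode_loc.2 then false else true

-- the 'while is_valid_loc(a, …): add a; step a' loop; the fuel nrows.toNat + ncols.toNat + 1
-- provably suffices under Pre_ (the step is nonzero whenever a loop makes a first iteration)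
def pvLoopA (d : Int × Int) (nrows ncols : Int) : Nat → (Int × Int) → PySem.Set (Int × Int) → PySem.Set (Int × Int)
  | 0, _, acc => acc
  | fuel+1, a, acc =>
    if pvIsValidLoc a nrows ncols then
      pvLoopA d nrows ncols fuel (a.1 + d.1, a.2 + d.2) (PySem.Set.add acc a)
    else acc

def get_all_antinode_locs (frequency_pair : (Int × Int) × (Int × Int)) (nrows : Int) (ncols : Int) : List (Int × Int) :=
  let p1 := frequency_pair.1
  let p2 := frequency_pair.2
  let dx := p1.1 - p2.1
  let dy := p1.2 - p2.2
  let fuel := nrows.toNat + ncols.toNat + 1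
  let s1 := pvLoopA (dx, dy) nrows ncols fuel (p1.1, p1.2) PySem.Set.empty
  pvLoopA (-dx, -dy) nrows ncols fuel (p2.1, p2.2) s1

-- ===== PORT B =====
def pvRayB (p : Int × Int) (sx sy nrows ncols : Int) : List (Int × Int) :=
  if p.1 < 0 || nrows ≤ p.1 || p.2 < 0 || ncols ≤ p.2 then []
  else
    let bounds : List Int :=
      (if 0 < sx then [PySem.Int.floordiv (nrows - 1 - p.1) sx]
       else if sx < 0 then [PySem.Int.floordiv p.1 (-sx)] else []) ++
      (if 0 < sy then [PySem.Int.floordiv (ncols - 1 - p.2) sy]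
       else if sy < 0 then [PySem.Int.floordiv p.2 (-sy)] else [])
    match PySem.List.min? bounds (fun b => b) with
    | none => [(p.1, p.2)]
    | some f => (PySem.List.pyRange 0 (f + 1)).map (fun k => (p.1 + k * sx, p.2 + k * sy))

def get_all_antinode_locs_alt (frequency_pair : (Int × Int) × (Int × Int)) (nrows : Int) (ncols : Int) : List (Int × Int) :=
  let p1 := frequency_pair.1
  let p2 := frequency_pair.2
  let dx := p1.1 - p2.1
  let dy := p1.2 - p2.2
  PySem.Set.ofList (pvRayB p1 dx dy nrows ncols ++ pvRayB p2 (-dx) (-dy) nrows ncols)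

-- ===== PRECONDITION & SPEC =====
-- Pre_ excludes only the inputs where A never returns: p1 = p2 with the point inside the
-- grid gives the step (0,0) and A's first while-loop runs forever.
def Pre_get_all_antinode_locs (frequency_pair : (Int × Int) × (Int × Int)) (nrows : Int) (ncols : Int) : Prop :=
  frequency_pair.1 = frequency_pair.2 →
    (frequency_pair.1.1 < 0 ∨ nrows ≤ frequency_pair.1.1 ∨ frequency_pair.1.2 < 0 ∨ ncols ≤ frequency_pair.1.2)
instance (frequency_pair : (Int × Int) × (Int × Int)) (nrows : Int) (ncols : Int) : Decidable (Pre_get_all_antinode_locs frequency_pair nrows ncols) := by unfold Pre_get_all_antinode_locs; infer_instance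

def pvWitness_get_all_antinode_locs : ((Int × Int) × (Int × Int)) × Int × Int := (((0, 0), (1, 2)), 5, 5)

def Spec_get_all_antinode_locs (frequency_pair : (Int × Int) × (Int × Int)) (nrows : Int) (ncols : Int) (out : List (Int × Int)) : Prop := out = get_all_antinode_locs_alt frequency_pair nrows ncols
instance (frequency_pair : (Int × Int) × (Int × Int)) (nrows : Int) (ncols : Int) (out : List (Int × Int)) : Decidable (Spec_get_all_antinode_locs frequency_pair nrows ncols out) := by unfold Spec_get_all_antinode_locs; infer_instance

-- ===== CLAIM (what is proved, stated in full; the proofs are below) =====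
def Claim_equal_get_all_antinode_locs : Prop := ∀ (frequency_pair : (Int × Int) × (Int × Int)) (nrows : Int) (ncols : Int), Dom_get_all_antinode_locs frequency_pair nrows ncols → Pre_get_all_antinode_locs frequency_pair nrows ncols → Spec_get_all_antinode_locs frequency_pair nrows ncols (get_all_antinode_locs frequency_pair nrows ncols)

-- ===== LEMMAS AND PROOFS =====

theorem pvValid_iff (a : Int × Int) (nr nc : Int) :
    pvIsValidLoc a nr nc = true ↔ (0 ≤ a.1 ∧ a.1 < nr ∧ 0 ≤ a.2 ∧ a.2 < nc) := by
  simp only [pvIsValidLoc]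
  split <;> rename_i h <;> simp at h ⊢ <;> omega

theorem pvValid_false_iff (a : Int × Int) (nr nc : Int) :
    pvIsValidLoc a nr nc = false ↔ ¬ (0 ≤ a.1 ∧ a.1 < nr ∧ 0 ≤ a.2 ∧ a.2 < nc) := by
  rw [← pvValid_iff]
  simp

-- proof-side view of A's loop: the list of points it visits, in visit order
def pvRayF (d : Int × Int) (nrows ncols : Int) : Nat → (Int × Int) → List (Int × Int)
  | 0, _ => []
  | fuel+1, a => if pvIsValidLoc a nrows ncols then a :: pvRayF d nrows ncols fuel (a.1 + d.1, a.2 + d.2) else []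

theorem pvLoopA_eq_foldl (d : Int × Int) (nrows ncols : Int) (fuel : Nat) (a : Int × Int) (acc : PySem.Set (Int × Int)) :
    pvLoopA d nrows ncols fuel a acc = (pvRayF d nrows ncols fuel a).foldl PySem.Set.add acc := by
  induction fuel generalizing a acc with
  | zero => simp [pvLoopA, pvRayF]
  | succ n ih =>
    simp only [pvLoopA, pvRayF]
    by_cases h : pvIsValidLoc a nrows ncols <;> simp [h, ih]

theorem pvRayF_invalid (d : Int × Int) (nrows ncols : Int) (fuel : Nat) (a : Int × Int)
    (h : pvIsValidLoc a nrows ncols = false) : pvRayF d nrows ncols fuel a = [] := by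
  cases fuel <;> simp [pvRayF, h]

-- the fueled loop from a valid start, with the interval of valid step counts known, is a range map
theorem pvRayF_closed (d : Int × Int) (nrows ncols : Int) (f : Nat) :
    ∀ (fuel : Nat) (a : Int × Int), f < fuel →
    (∀ k : Nat, k ≤ f → pvIsValidLoc (a.1 + (k : Int) * d.1, a.2 + (k : Int) * d.2) nrows ncols = true) →
    pvIsValidLoc (a.1 + ((f + 1 : Nat) : Int) * d.1, a.2 + ((f + 1 : Nat) : Int) * d.2) nrows ncols = false →
    pvRayF d nrows ncols fuel a = (List.range (f + 1)).map (fun k : Nat => (a.1 + (k : Int) * d.1, a.2 + (k : Int) * d.2)) := by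
  induction f with
  | zero =>
    intro fuel a hfuel hvalid hstop
    obtain ⟨m, rfl⟩ : ∃ m, fuel = m + 1 := ⟨fuel - 1, by omega⟩
    have h0 := hvalid 0 (le_refl 0)
    simp only [Nat.cast_zero, zero_mul, add_zero] at h0
    have h0' : pvIsValidLoc a nrows ncols = true := by cases a; simpa using h0
    simp only [pvRayF, h0', if_true]
    rw [pvRayF_invalid]
    · cases a; simp
    · simpa using hstop
  | succ n ih =>
    intro fuel a hfuel hvalid hstop
    obtain ⟨m, rfl⟩ : ∃ m, fuel = m + 1 := ⟨fuel - 1, by omega⟩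
    have h0 := hvalid 0 (by omega)
    simp only [Nat.cast_zero, zero_mul, add_zero] at h0
    have h0' : pvIsValidLoc a nrows ncols = true := by cases a; simpa using h0
    simp only [pvRayF, h0', if_true]
    have hshift : ∀ k : Nat, ((a.1 + d.1) + (k : Int) * d.1, (a.2 + d.2) + (k : Int) * d.2)
        = (a.1 + ((k + 1 : Nat) : Int) * d.1, a.2 + ((k + 1 : Nat) : Int) * d.2) := by
      intro k
      have h1 : (a.1 + d.1) + (k : Int) * d.1 = a.1 + ((k + 1 : Nat) : Int) * d.1 := by push_cast; ring
      have h2 : (a.2 + d.2) + (k : Int) * d.2 = a.2 + ((k + 1 : Nat) : Int) * d.2 := by push_cast; ring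
      rw [h1, h2]
    rw [ih m (a.1 + d.1, a.2 + d.2) (by omega)
      (by
        intro k hk
        simp only []
        rw [hshift k]
        exact hvalid (k + 1) (by omega))
      (by
        simp only []
        rw [hshift (n + 1)]
        exact hstop)]
    conv_rhs => rw [List.range_succ_eq_map, List.map_cons, List.map_map]
    congr 1
    · cases a; simp
    · apply List.map_congr_left
      intro k _
      simp only [Function.comp]
      exact hshift k

theorem pvCoordBound_pos (x s n : Int) (k : Int) (hx : 0 ≤ x) (hs : 0 < s) (hk : 0 ≤ k) :
    (0 ≤ x + k * s ∧ x + k * s < n) ↔ k ≤ PySem.Int.floordiv (n - 1 - x) s := by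
  rw [PySem.Int.le_floordiv_iff_mul_le hs]
  constructor
  · intro ⟨_, h2⟩; nlinarith
  · intro h
    exact ⟨by nlinarith, by nlinarith⟩

theorem pvCoordBound_neg (x s n : Int) (k : Int) (hx : x < n) (hs : s < 0) (hk : 0 ≤ k) :
    (0 ≤ x + k * s ∧ x + k * s < n) ↔ k ≤ PySem.Int.floordiv x (-s) := by
  rw [PySem.Int.le_floordiv_iff_mul_le (by omega)]
  constructor
  · intro ⟨h1, _⟩; nlinarith
  · intro h
    exact ⟨by nlinarith, by nlinarith⟩

-- per-coordinate bracket: for 0 ≤ x < n and s ≠ 0 the in-bounds step counts are exactly k ≤ B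
theorem pvBound_spec (x s n : Int) (hx0 : 0 ≤ x) (hxn : x < n) (hs : s ≠ 0) :
    ∃ B : Int,
      (if 0 < s then [PySem.Int.floordiv (n - 1 - x) s] else if s < 0 then [PySem.Int.floordiv x (-s)] else []) = [B] ∧
      0 ≤ B ∧ B < n ∧
      ∀ k : Int, 0 ≤ k → ((0 ≤ x + k * s ∧ x + k * s < n) ↔ k ≤ B) := by
  rcases lt_trichotomy s 0 with hneg | hzero | hpos
  · refine ⟨PySem.Int.floordiv x (-s), by simp [hneg, not_lt_of_gt hneg], ?_, ?_, ?_⟩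
    · rw [PySem.Int.le_floordiv_iff_mul_le (by omega)]; nlinarith
    · rw [← not_le, PySem.Int.le_floordiv_iff_mul_le (by omega)]
      intro h; nlinarith
    · intro k hk
      exact pvCoordBound_neg x s n k hxn hneg hk
  · exact absurd hzero hs
  · refine ⟨PySem.Int.floordiv (n - 1 - x) s, by simp [hpos], ?_, ?_, ?_⟩
    · rw [PySem.Int.le_floordiv_iff_mul_le hpos]; nlinarith
    · rw [← not_le, PySem.Int.le_floordiv_iff_mul_le hpos]
      intro h; nlinarith
    · intro k hk
      exact pvCoordBound_pos x s n k hx0 hpos hk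

theorem pvMin_singleton (a : Int) : PySem.List.min? [a] (fun b => b) = some a := by
  simp [PySem.List.min?]

theorem pvMin_pair (a b : Int) : PySem.List.min? [a, b] (fun x => x) = some (min a b) := by
  simp only [PySem.List.min?, List.foldl]
  rcases lt_or_ge b a with h | h <;> simp [h, min_def]

-- the minimum of B's candidate bounds characterizes the valid step counts
theorem pvMin_spec (p : Int × Int) (sx sy nrows ncols : Int)
    (hx0 : 0 ≤ p.1) (hxn : p.1 < nrows) (hy0 : 0 ≤ p.2) (hyn : p.2 < ncols)
    (hd : ¬ (sx = 0 ∧ sy = 0)) :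
    ∃ f : Int,
      PySem.List.min?
        ((if 0 < sx then [PySem.Int.floordiv (nrows - 1 - p.1) sx]
          else if sx < 0 then [PySem.Int.floordiv p.1 (-sx)] else []) ++
         (if 0 < sy then [PySem.Int.floordiv (ncols - 1 - p.2) sy]
          else if sy < 0 then [PySem.Int.floordiv p.2 (-sy)] else [])) (fun b => b) = some f ∧
      0 ≤ f ∧ f < nrows + ncols ∧
      ∀ k : Int, 0 ≤ k →
        (k ≤ f ↔ (0 ≤ p.1 + k * sx ∧ p.1 + k * sx < nrows ∧ 0 ≤ p.2 + k * sy ∧ p.2 + k * sy < ncols)) := by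
  by_cases hsx : sx = 0
  · have hsy : sy ≠ 0 := fun h => hd ⟨hsx, h⟩
    obtain ⟨B, hB, hB0, hBn, hBk⟩ := pvBound_spec p.2 sy ncols hy0 hyn hsy
    refine ⟨B, ?_, hB0, by omega, ?_⟩
    · simp [hsx, hB, pvMin_singleton]
    · intro k hk
      rw [← hBk k hk]
      simp [hsx]
      omega
  · by_cases hsy : sy = 0
    · obtain ⟨B, hB, hB0, hBn, hBk⟩ := pvBound_spec p.1 sx nrows hx0 hxn hsx
      refine ⟨B, ?_, hB0, by omega, ?_⟩
      · simp [hsy, hB, pvMin_singleton]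
      · intro k hk
        rw [← hBk k hk]
        simp [hsy]
        omega
    · obtain ⟨Bx, hBx, hBx0, hBxn, hBxk⟩ := pvBound_spec p.1 sx nrows hx0 hxn hsx
      obtain ⟨By, hBy, hBy0, hByn, hByk⟩ := pvBound_spec p.2 sy ncols hy0 hyn hsy
      refine ⟨min Bx By, ?_, by omega, by omega, ?_⟩
      · rw [hBx, hBy]
        exact pvMin_pair Bx By
      · intro k hk
        rw [le_min_iff, ← hBxk k hk, ← hByk k hk]
        tauto

-- the main per-ray lemma: for a nonzero step, A's fueled sweep equals B's closed-form ray
theorem pvRay_eq (p : Int × Int) (sx sy nrows ncols : Int) (fuel : Nat)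
    (hd : ¬ (sx = 0 ∧ sy = 0)) (hfuel : nrows.toNat + ncols.toNat < fuel) :
    pvRayF (sx, sy) nrows ncols fuel (p.1, p.2) = pvRayB p sx sy nrows ncols := by
  by_cases hv : p.1 < 0 ∨ nrows ≤ p.1 ∨ p.2 < 0 ∨ ncols ≤ p.2
  · have hg : (decide (p.1 < 0) || decide (nrows ≤ p.1) || decide (p.2 < 0) || decide (ncols ≤ p.2)) = true := by
      rcases hv with h | h | h | h <;> simp [h]
    rw [pvRayF_invalid _ _ _ _ _ (by rw [pvValid_false_iff]; omega)]
    rw [pvRayB, if_pos hg]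
  · push Not at hv
    obtain ⟨hx0, hxn, hy0, hyn⟩ := hv
    obtain ⟨f, hmin, hf0, hfb, hfk⟩ := pvMin_spec p sx sy nrows ncols hx0 hxn hy0 hyn hd
    have hvalid : ∀ k : Nat, k ≤ f.toNat → pvIsValidLoc (p.1 + (k : Int) * sx, p.2 + (k : Int) * sy) nrows ncols = true := by
      intro k hk
      rw [pvValid_iff]
      have := (hfk k (by positivity)).mp (by omega)
      simpa using this
    have hstop : pvIsValidLoc (p.1 + ((f.toNat + 1 : Nat) : Int) * sx, p.2 + ((f.toNat + 1 : Nat) : Int) * sy) nrows ncols = false := by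
      rw [pvValid_false_iff]
      have hne : ¬ ((f.toNat + 1 : Int) ≤ f) := by omega
      rw [hfk (f.toNat + 1) (by omega)] at hne
      push_cast
      simpa using hne
    rw [pvRayF_closed (sx, sy) nrows ncols f.toNat fuel (p.1, p.2) (by omega) hvalid hstop]
    rw [pvRayB, if_neg (by simp; omega)]
    simp only [hmin]
    have h1 : f + 1 = (((f + 1).toNat : Nat) : Int) := by omega
    rw [h1, PySem.List.pyRange_zero_natCast]
    have h2 : (f + 1).toNat = f.toNat + 1 := by omega
    rw [h2, List.map_map]
    apply List.map_congr_left
    intro k _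
    simp [Function.comp]

-- ===== VERDICT (by name: the statement is the Claim_ definition above) =====
theorem get_all_antinode_locs_spec : Claim_equal_get_all_antinode_locs := by
  intro fp nrows ncols hdom hpre
  unfold Spec_get_all_antinode_locs
  show pvLoopA (-(fp.1.1 - fp.2.1), -(fp.1.2 - fp.2.2)) nrows ncols (nrows.toNat + ncols.toNat + 1) (fp.2.1, fp.2.2)
      (pvLoopA (fp.1.1 - fp.2.1, fp.1.2 - fp.2.2) nrows ncols (nrows.toNat + ncols.toNat + 1) (fp.1.1, fp.1.2) PySem.Set.empty)
    = PySem.Set.ofList (pvRayB fp.1 (fp.1.1 - fp.2.1) (fp.1.2 - fp.2.2) nrows ncols ++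
        pvRayB fp.2 (-(fp.1.1 - fp.2.1)) (-(fp.1.2 - fp.2.2)) nrows ncols)
  rw [pvLoopA_eq_foldl, pvLoopA_eq_foldl, PySem.Set.ofList_eq_foldl, List.foldl_append]
  by_cases hd : fp.1.1 - fp.2.1 = 0 ∧ fp.1.2 - fp.2.2 = 0
  · -- p1 = p2: Pre_ puts the point out of bounds, so all four lists are empty
    have hp : fp.1 = fp.2 := by
      obtain ⟨⟨a, b⟩, ⟨c, e⟩⟩ := fp
      simp at hd ⊢
      omega
    have hinv := hpre hp
    have h1 : pvIsValidLoc (fp.1.1, fp.1.2) nrows ncols = false := by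
      rw [pvValid_false_iff]; simp; omega
    have h2 : pvIsValidLoc (fp.2.1, fp.2.2) nrows ncols = false := by rw [← hp]; exact h1
    have hg1 : pvRayB fp.1 (fp.1.1 - fp.2.1) (fp.1.2 - fp.2.2) nrows ncols = [] := by
      rw [pvRayB, if_pos (by rcases hinv with h | h | h | h <;> simp [h])]
    have hg2 : pvRayB fp.2 (-(fp.1.1 - fp.2.1)) (-(fp.1.2 - fp.2.2)) nrows ncols = [] := by
      rw [pvRayB, if_pos (by rw [← hp]; rcases hinv with h | h | h | h <;> simp [h])]
    rw [pvRayF_invalid _ _ _ _ _ h1, pvRayF_invalid _ _ _ _ _ h2, hg1, hg2]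
    rfl
  · rw [pvRay_eq fp.1 (fp.1.1 - fp.2.1) (fp.1.2 - fp.2.2) nrows ncols _ hd (by omega)]
    rw [pvRay_eq fp.2 (-(fp.1.1 - fp.2.1)) (-(fp.1.2 - fp.2.2)) nrows ncols _ (by omega) (by omega)]
    rfl
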